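-- pv_equiv track=rewrite | github.com/awenbigprawn/shownuminlog | shownuminlog.py | build_label_line
-- ===== SOURCE A (Python) =====
-- def build_label_line(width: int, position: int, label: str) -> str:
--     position = max(0, min(width, position))
--     line = [" "] * (width + 1)
--     start = max(0, min(width - len(label) + 1, position - len(label) // 2))
--     for idx, char in enumerate(label):
--         if start + idx <= width:
--             line[start + idx] = char
--     return "".join(line)
-- ===== SOURCE B (Python) =====
-- def build_label_line(width: int, position: int, label: str) -> str:
--     position = max(0, min(width, position))
--     start = max(0, min(width - len(label) + 1, position - len(label) // 2))
--     L = max(0, width + 1)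
--     return (" " * start + label)[:L].ljust(L)
-- ===== Notes on version B (the rewrite author's own statement) =====
-- stated objective: faster
-- what changed: Replaces A's mutate-a-preallocated-list loop (indexed character placement with a bounds guard) by building the line as ' '*start + label, truncating with a slice to max(0,width+1) and right-padding with ljust.
import Mathlib
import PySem

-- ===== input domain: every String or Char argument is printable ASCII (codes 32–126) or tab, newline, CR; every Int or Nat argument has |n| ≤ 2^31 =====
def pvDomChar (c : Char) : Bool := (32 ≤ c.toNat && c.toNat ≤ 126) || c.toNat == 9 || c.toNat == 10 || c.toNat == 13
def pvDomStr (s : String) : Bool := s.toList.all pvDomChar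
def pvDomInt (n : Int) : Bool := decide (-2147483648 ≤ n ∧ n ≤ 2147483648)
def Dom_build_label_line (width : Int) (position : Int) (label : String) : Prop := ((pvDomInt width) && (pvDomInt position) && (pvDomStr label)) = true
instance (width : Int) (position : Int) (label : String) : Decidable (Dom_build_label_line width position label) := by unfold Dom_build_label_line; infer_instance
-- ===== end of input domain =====

-- B replaces A's per-character list-mutation loop by string concatenation, slicing and padding (same asymptotics; measured constant-factor faster in Python).

-- ===== PORT A =====
def build_label_line (width : Int) (position : Int) (label : String) : String :=
  let position := max 0 (min width position)
  let line : List Char := PySem.List.pyRepeat [' '] (width + 1)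
  let start : Int := max 0 (min (width - (label.toList.length : Int) + 1)
                               (position - PySem.Int.floordiv (label.toList.length : Int) 2))
  let line := (PySem.List.enumerate label.toList 0).foldl
    (fun ln (p : Int × Char) => if start + p.1 ≤ width then ln.set (start + p.1).toNat p.2 else ln) line
  String.mk line

-- ===== PORT B =====
def build_label_line_alt (width : Int) (position : Int) (label : String) : String :=
  let position := max 0 (min width position)
  let start : Int := max 0 (min (width - (label.toList.length : Int) + 1)
                               (position - PySem.Int.floordiv (label.toList.length : Int) 2))
  let L : Int := max 0 (width + 1)
  let content : List Char := PySem.List.pyRepeat [' '] start ++ label.toList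
  let truncated : List Char := PySem.List.slice content none (some L)
  -- ljust ported by hand: pad on the right with spaces up to length L (exact: lengths are code-point counts)
  String.mk (truncated ++ List.replicate (L.toNat - truncated.length) ' ')

-- ===== PRECONDITION & SPEC =====
def Spec_build_label_line (width : Int) (position : Int) (label : String) (out : String) : Prop := out = build_label_line_alt width position label
instance (width : Int) (position : Int) (label : String) (out : String) : Decidable (Spec_build_label_line width position label out) := by unfold Spec_build_label_line; infer_instance

-- ===== CLAIM (what is proved, stated in full; the proofs are below) =====
def Claim_equal_build_label_line : Prop := ∀ (width : Int) (position : Int) (label : String), Dom_build_label_line width position label → Spec_build_label_line width position label (build_label_line width position label)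

-- ===== LEMMAS AND PROOFS =====

-- What A's placement loop computes, element by element.
lemma loop_get (n : List Char) (width : Int) (s : Nat) :
    ∀ (k : Nat) (buf : List Char), buf.length = (width + 1).toNat →
    ∀ (j : Nat),
    ((PySem.List.enumerate n (k : Int)).foldl
      (fun ln (p : Int × Char) => if (s : Int) + p.1 ≤ width then ln.set ((s : Int) + p.1).toNat p.2 else ln)
      buf)[j]?
    = if s + k ≤ j ∧ j < s + k + n.length ∧ j < buf.length then n[j - (s + k)]? else buf[j]? := by
  induction n with
  | nil =>
    intro k buf hlen j
    simp [PySem.List.enumerate]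
    intro h1 h2; omega
  | cons c n ih =>
    intro k buf hlen j
    rw [show ((k : Int)) = ((k : Nat) : Int) from rfl, PySem.List.enumerate_cons, List.foldl_cons]
    have hcast : (k : Int) + 1 = ((k + 1 : Nat) : Int) := by push_cast; ring
    by_cases hc : (s : Int) + (k : Int) ≤ width
    · have hlt : s + k < buf.length := by
        rw [hlen]; omega
      simp only [if_pos hc]
      have hsk : ((s : Int) + (k : Int)).toNat = s + k := by omega
      rw [hcast, ih (k + 1) (buf.set ((s : Int) + (k : Int)).toNat c) (by simp [hlen]) j]
      rw [hsk]
      by_cases hj : j = s + k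
      · subst hj
        simp [hlt]
      · rw [List.getElem?_set_ne (by omega)]
        simp only [List.length_set]
        by_cases h1 : s + (k + 1) ≤ j ∧ j < s + (k + 1) + n.length ∧ j < buf.length
        · rw [if_pos h1, if_pos (by simp at h1 ⊢; omega)]
          have : j - (s + k) = (j - (s + (k + 1))) + 1 := by omega
          rw [this]; simp
        · rw [if_neg (by simpa using h1), if_neg (by simp at h1 ⊢; omega)]
    · simp only [if_neg hc]
      rw [hcast, ih (k + 1) buf hlen j]
      have hout : ¬ (s + k ≤ j ∧ j < s + k + (c :: n).length ∧ j < buf.length) ↔ True := by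
        constructor
        · intro _; trivial
        · intro _ h
          -- if s+k ≤ j < buf.length then (s:Int)+k ≤ width, contradiction with hc
          have : (s + k : Int) ≤ width := by
            have := h.1; have := h.2.2; omega
          exact hc (by exact_mod_cast this)
      by_cases h1 : s + (k + 1) ≤ j ∧ j < s + (k + 1) + n.length ∧ j < buf.length
      · rw [if_pos h1, if_pos (by simp at h1 ⊢; omega)]
        have : j - (s + k) = (j - (s + (k + 1))) + 1 := by omega
        rw [this]; simp
      · rw [if_neg (by simpa using h1)]
        rw [if_neg]
        intro h
        have hj1 : s + k ≤ j := h.1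
        have hj3 : j < buf.length := h.2.2
        have : (s + k : Int) ≤ width := by
          rw [hlen] at hj3; omega
        exact hc (by exact_mod_cast this)

-- ===== VERDICT (by name: the statement is the Claim_ definition above) =====
theorem build_label_line_spec : Claim_equal_build_label_line := by
  intro width position label _
  unfold Spec_build_label_line build_label_line build_label_line_alt
  simp only []
  set n := label.toList with hn
  set start : Int := max 0 (min (width - (n.length : Int) + 1)
      ((max 0 (min width position)) - PySem.Int.floordiv (n.length : Int) 2)) with hstart
  have hs0 : 0 ≤ start := le_max_left _ _
  set s : Nat := start.toNat with hsdef
  have hs : (s : Int) = start := Int.toNat_of_nonneg hs0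
  set W : Nat := (width + 1).toNat with hW
  apply congrArg String.mk
  apply List.ext_getElem?
  intro j
  -- LHS via loop_get
  have hline : (PySem.List.pyRepeat [' '] (width + 1) : List Char) = List.replicate W ' ' := by
    rw [PySem.List.pyRepeat_singleton]
  rw [hline]
  have hA := loop_get n width s 0 (List.replicate W ' ') (by simpa using hW) j
  simp only [Nat.cast_zero, add_zero, List.length_replicate] at hA
  rw [← hs]
  rw [hA]
  -- RHS shape
  have hLnn : (0 : Int) ≤ max 0 (width + 1) := le_max_left _ _
  rw [PySem.List.slice_to _ hLnn, PySem.List.pyRepeat_singleton]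
  have hLW : (max 0 (width + 1)).toNat = W := by omega
  have hsW : ((s : Int)).toNat = s := by omega
  rw [hsW, hLW]
  simp only [List.length_replicate, List.length_take, List.length_append]
  by_cases hjW : j < W
  · by_cases hmid : s ≤ j ∧ j < s + n.length
    · rw [if_pos ⟨hmid.1, hmid.2, hjW⟩]
      have hjc : j < min W (s + n.length) := by omega
      rw [List.getElem?_append_left (by simpa using hjc), List.getElem?_take_of_lt hjW,
          List.getElem?_append_right (by simpa using hmid.1)]
      simp
    · rw [if_neg (by omega)]
      by_cases hjs : j < s
      · have h2 : j < min W (s + n.length) := by omega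
        rw [List.getElem?_append_left (by simpa using h2), List.getElem?_take_of_lt hjW,
            List.getElem?_append_left (by simpa using hjs)]
        simp [hjW, hjs]
      · have hge : s + n.length ≤ j := by omega
        rw [List.getElem?_append_right (by simp; omega)]
        simp [hjW, List.getElem?_replicate]
        omega
  · rw [if_neg (by omega)]
    rw [List.getElem?_replicate, if_neg hjW]
    symm
    apply List.getElem?_eq_none
    simp
    omega
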